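-- pv_equiv track=rewrite | github.com/ErickElizondo/Gregorian-Calendar-Functions | As1aOr_correction.py | fecha_es_valida
-- ===== SOURCE A (Python) =====
-- institucion_calendario_gregoriano = 1582
--
-- meses_31_dias = [1, 3, 5, 7, 8, 10, 12]
--
-- meses_30_dias = [4, 6, 9, 11]
--
-- def bisiesto(year):
--     if (year % 100) == 0:
--         if (year % 400) == 0:
--             return True
--     else:
--         if (year % 4) == 0:
--             return True
--     return False
--
-- def fecha_es_valida(fecha):
--     if (len(fecha) == 3):
--         for var in range(len(fecha)):
--             if type(fecha[var]) != int or fecha[var] < 0: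
--                 return False
--         # Validación si fecha es mayor a la instituida
--         if (fecha[0] >= institucion_calendario_gregoriano):
--             # Teniendo un año bisiesto, se valida el día
--             return validar_dia_mes(fecha[0], fecha[1], fecha[2])
--         else:
--             return False
--     else:
--         return False
--
-- def validar_dia_mes(ano, mes, dia):
--     if (mes in meses_31_dias and dia >= 1):
--         return (dia <= 31)
--     elif (mes in meses_30_dias and dia >= 1):
--         return (dia <= 30)
--     elif (mes == 2 and dia >= 1):
--         if bisiesto(ano):
--             return (dia <= 29)
--         else:
--             return (dia <= 28)
--     else:
--         return False
-- ===== SOURCE B (Python) =====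
-- institucion_calendario_gregoriano = 1582
--
-- def fecha_es_valida(fecha):
--     if len(fecha) != 3:
--         return False
--     if any(type(x) != int or x < 0 for x in fecha):
--         return False
--     ano, mes, dia = fecha
--     if ano < institucion_calendario_gregoriano or not (1 <= mes <= 12):
--         return False
--     # closed-form month length: no table, no membership test
--     tope = 28 + (mes + mes // 8) % 2 + 2 % mes + 2 * (1 // mes)
--     if mes == 2 and ano % 4 == 0 and (ano % 100 != 0 or ano % 400 == 0):
--         tope += 1
--     return 1 <= dia <= tope
-- ===== Notes on version B (the rewrite author's own statement) =====
-- stated objective: alternative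
-- what changed: Drops the two month-category lists and the three-way membership branch entirely: the month length comes from the closed-form arithmetic formula 28 + (mes + mes//8) % 2 + 2 % mes + 2*(1//mes), with a one-line leap test bumping February, and validity is one range check 1 <= dia <= tope.
import Mathlib
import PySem

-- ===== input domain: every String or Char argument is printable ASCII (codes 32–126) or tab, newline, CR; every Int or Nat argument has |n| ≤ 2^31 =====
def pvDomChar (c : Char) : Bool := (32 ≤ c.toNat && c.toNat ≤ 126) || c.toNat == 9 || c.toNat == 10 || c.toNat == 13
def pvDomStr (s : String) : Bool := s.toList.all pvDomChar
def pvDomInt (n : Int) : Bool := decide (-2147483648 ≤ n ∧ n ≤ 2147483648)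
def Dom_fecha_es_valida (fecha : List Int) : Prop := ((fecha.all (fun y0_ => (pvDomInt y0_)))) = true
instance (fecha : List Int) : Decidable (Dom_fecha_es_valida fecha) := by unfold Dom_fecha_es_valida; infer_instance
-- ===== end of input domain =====

-- B replaces A's month-category lists and three-way branch with a closed-form
-- arithmetic month-length formula (alternative decomposition; same cost).

-- ===== PORT A =====
def meses_31_dias : List Int := [1, 3, 5, 7, 8, 10, 12]
def meses_30_dias : List Int := [4, 6, 9, 11]

def bisiesto (year : Int) : Bool :=
  if PySem.Int.mod year 100 == 0 then
    (if PySem.Int.mod year 400 == 0 then true else false)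
  else
    (if PySem.Int.mod year 4 == 0 then true else false)

def validar_dia_mes (ano mes dia : Int) : Bool :=
  if meses_31_dias.contains mes && dia ≥ 1 then dia ≤ 31
  else if meses_30_dias.contains mes && dia ≥ 1 then dia ≤ 30
  else if mes == 2 && dia ≥ 1 then
    (if bisiesto ano then dia ≤ 29 else dia ≤ 28)
  else false

-- the for-loop over range(len(fecha)) with early return False on a negative element
-- (type(x) != int never fires on List Int)
def fecha_loop (l : List Int) : Bool :=
  match l with
  | [] => true
  | x :: xs => if x < 0 then false else fecha_loop xs

def fecha_es_valida (fecha : List Int) : Bool :=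
  if fecha.length == 3 then
    if fecha_loop fecha then
      if ((PySem.List.pyGet? fecha 0).getD 0) ≥ 1582 then
        validar_dia_mes ((PySem.List.pyGet? fecha 0).getD 0)
          ((PySem.List.pyGet? fecha 1).getD 0) ((PySem.List.pyGet? fecha 2).getD 0)
      else false
    else false
  else false

-- ===== PORT B =====
def fecha_es_valida_alt (fecha : List Int) : Bool :=
  match fecha with
  | [ano, mes, dia] =>
    if ano < 0 || mes < 0 || dia < 0 then false
    else if ano < 1582 || !(1 ≤ mes && mes ≤ 12) then false
    else
      let tope0 : Int := 28 + PySem.Int.mod (mes + PySem.Int.floordiv mes 8) 2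
        + PySem.Int.mod 2 mes + 2 * PySem.Int.floordiv 1 mes
      let tope : Int :=
        if mes == 2 && PySem.Int.mod ano 4 == 0
            && (PySem.Int.mod ano 100 != 0 || PySem.Int.mod ano 400 == 0) then tope0 + 1
        else tope0
      1 ≤ dia && dia ≤ tope
  | _ => false

-- ===== PRECONDITION & SPEC =====
def Spec_fecha_es_valida (fecha : List Int) (out : Bool) : Prop := out = fecha_es_valida_alt fecha
instance (fecha : List Int) (out : Bool) : Decidable (Spec_fecha_es_valida fecha out) := by unfold Spec_fecha_es_valida; infer_instance

-- ===== CLAIM (what is proved, stated in full; the proofs are below) =====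
def Claim_equal_fecha_es_valida : Prop := ∀ (fecha : List Int), Dom_fecha_es_valida fecha → Spec_fecha_es_valida fecha (fecha_es_valida fecha)

-- ===== LEMMAS AND PROOFS =====

theorem mod_emod (a b : Int) (hb : 0 < b) : PySem.Int.mod a b = a % b :=
  PySem.Int.mod_eq_emod_of_pos hb

set_option maxHeartbeats 1000000 in
theorem main_case (ano mes dia : Int) :
    fecha_es_valida [ano, mes, dia] = fecha_es_valida_alt [ano, mes, dia] := by
  by_cases hmr : 1 ≤ mes ∧ mes ≤ 12
  · have h12 : mes = 1 ∨ mes = 2 ∨ mes = 3 ∨ mes = 4 ∨ mes = 5 ∨ mes = 6 ∨ mes = 7 ∨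
        mes = 8 ∨ mes = 9 ∨ mes = 10 ∨ mes = 11 ∨ mes = 12 := by omega
    simp only [fecha_es_valida, fecha_es_valida_alt, fecha_loop, validar_dia_mes,
      bisiesto, meses_31_dias, meses_30_dias,
      mod_emod _ 100 (by norm_num), mod_emod _ 400 (by norm_num),
      mod_emod _ 4 (by norm_num)]
    rcases h12 with h|h|h|h|h|h|h|h|h|h|h|h <;> subst h <;>
      simp [PySem.List.pyGet?, PySem.List.pyIdx?, PySem.Int.mod, PySem.Int.floordiv] <;>
      (try split_ifs) <;>
      first
      | rfl
      | (rw [Bool.eq_iff_iff]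
         simp only [Bool.and_eq_true, Bool.not_eq_true', Bool.or_eq_true,
           decide_eq_true_eq, decide_eq_false_iff_not, beq_iff_eq, bne_iff_ne, ne_eq]
         omega)
  · simp only [fecha_es_valida, fecha_es_valida_alt, fecha_loop, validar_dia_mes,
      meses_31_dias, meses_30_dias]
    simp [PySem.List.pyGet?, PySem.List.pyIdx?]
    (try split_ifs) <;>
    first
    | rfl
    | (rw [Bool.eq_iff_iff]
       simp only [Bool.and_eq_true, Bool.not_eq_true', Bool.or_eq_true,
         Bool.false_eq_true, Bool.true_eq_false, decide_eq_true_eq, decide_eq_false_iff_not,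
         beq_iff_eq, bne_iff_ne, ne_eq, iff_false, iff_true, not_and, not_or, not_lt]
       omega)

-- ===== VERDICT (by name: the statement is the Claim_ definition above) =====
theorem fecha_es_valida_spec : Claim_equal_fecha_es_valida := by
  intro fecha _
  unfold Spec_fecha_es_valida
  match fecha with
  | [ano, mes, dia] => exact main_case ano mes dia
  | [] => rfl
  | [_] => rfl
  | [_, _] => rfl
  | _ :: _ :: _ :: _ :: _ => rfl
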